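-- pv_equiv track=rewrite | github.com/Ahuiting/SSBI | Assignment07/Renschler-Sperl_Xu_Assignment07.py | trypsin_digestion
-- ===== SOURCE A (Python) =====
-- def trypsin_digestion(sequence):
--     peptide_list = []
--     peptide = ""
--     for index, aa in enumerate(sequence):
--         peptide += aa
--         if (aa == "K" or aa == "R") and (index + 1 < len(sequence)) and (sequence[index + 1] != "P"):
--             peptide_list.append(peptide)
--             peptide = ""
--     # the last fragment
--     if peptide:
--         peptide_list.append(peptide)
--
--     return peptide_list
-- ===== SOURCE B (Python) =====
-- def trypsin_digestion(sequence):
--     # Two-pass: collect cut boundaries first, then slice the sequence at them.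
--     cuts = [i + 1 for i, aa in enumerate(sequence)
--             if aa in ("K", "R") and i + 1 < len(sequence) and sequence[i + 1] != "P"]
--     pieces = []
--     start = 0
--     for cut in cuts:
--         pieces.append(sequence[start:cut])
--         start = cut
--     if start < len(sequence):
--         pieces.append(sequence[start:])
--     return pieces
-- ===== Notes on version B (the rewrite author's own statement) =====
-- stated objective: simpler
-- what changed: B replaces A's single pass with a per-character growing string accumulator by first collecting the list of cut boundaries and then slicing the sequence between consecutive boundaries.
import Mathlib
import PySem

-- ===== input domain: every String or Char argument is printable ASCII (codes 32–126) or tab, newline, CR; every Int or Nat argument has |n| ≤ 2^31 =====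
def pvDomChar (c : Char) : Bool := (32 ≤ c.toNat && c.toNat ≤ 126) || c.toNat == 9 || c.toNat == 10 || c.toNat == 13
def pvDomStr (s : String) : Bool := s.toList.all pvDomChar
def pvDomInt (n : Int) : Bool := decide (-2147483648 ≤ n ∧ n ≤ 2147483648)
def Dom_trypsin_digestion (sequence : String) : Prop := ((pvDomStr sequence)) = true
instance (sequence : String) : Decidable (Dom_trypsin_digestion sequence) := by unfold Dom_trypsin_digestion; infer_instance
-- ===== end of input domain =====

-- B is simpler: it first collects the cut boundaries, then slices the sequence at them,
-- instead of growing a running peptide accumulator character by character.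

-- ===== PORT A =====
def trypsin_digestion (sequence : String) : List String :=
  let cs := sequence.toList
  let st := (PySem.List.enumerate cs 0).foldl
    (fun (s : List String × List Char) p =>
      let pep := s.2 ++ [p.2]
      if (p.2 == 'K' || p.2 == 'R') && decide (p.1 + 1 < (cs.length : Int))
          && (PySem.List.pyGetD cs (p.1 + 1) ' ' != 'P') then
        (s.1 ++ [String.ofList pep], [])
      else
        (s.1, pep))
    ([], [])
  if st.2 = [] then st.1 else st.1 ++ [String.ofList st.2]

-- ===== PORT B =====
def trypsin_digestion_alt (sequence : String) : List String :=
  let cs := sequence.toList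
  let cuts := (PySem.List.enumerate cs 0).filterMap
    (fun p => if (p.2 == 'K' || p.2 == 'R') && decide (p.1 + 1 < (cs.length : Int))
          && (PySem.List.pyGetD cs (p.1 + 1) ' ' != 'P') then some (p.1 + 1) else none)
  let st := cuts.foldl
    (fun (s : List String × Int) c =>
      (s.1 ++ [String.ofList (PySem.List.slice cs (some s.2) (some c))], c))
    ([], 0)
  if st.2 < (cs.length : Int) then
    st.1 ++ [String.ofList (PySem.List.slice cs (some st.2) none)]
  else st.1

-- ===== PRECONDITION & SPEC =====
def Spec_trypsin_digestion (sequence : String) (out : List String) : Prop := out = trypsin_digestion_alt sequence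
instance (sequence : String) (out : List String) : Decidable (Spec_trypsin_digestion sequence out) := by unfold Spec_trypsin_digestion; infer_instance

-- ===== CLAIM (what is proved, stated in full; the proofs are below) =====
def Claim_equal_trypsin_digestion : Prop := ∀ (sequence : String), Dom_trypsin_digestion sequence → Spec_trypsin_digestion sequence (trypsin_digestion sequence)

-- ===== LEMMAS AND PROOFS =====

theorem digestion_loop (cs : List Char) (rest : List Char) (k start : Nat)
    (acc : List String) (hk : cs.drop k = rest) (hs : start ≤ k) (hkn : k ≤ cs.length) :
    (let stA := (PySem.List.enumerate rest (k : Int)).foldl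
        (fun (s : List String × List Char) p =>
          let pep := s.2 ++ [p.2]
          if (p.2 == 'K' || p.2 == 'R') && decide (p.1 + 1 < (cs.length : Int))
              && (PySem.List.pyGetD cs (p.1 + 1) ' ' != 'P') then
            (s.1 ++ [String.ofList pep], []) else (s.1, pep))
        (acc, (cs.drop start).take (k - start));
     if stA.2 = [] then stA.1 else stA.1 ++ [String.ofList stA.2]) =
    (let stB := ((PySem.List.enumerate rest (k : Int)).filterMap
        (fun p => if (p.2 == 'K' || p.2 == 'R') && decide (p.1 + 1 < (cs.length : Int))
              && (PySem.List.pyGetD cs (p.1 + 1) ' ' != 'P') then some (p.1 + 1) else none)).foldl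
        (fun (s : List String × Int) c =>
          (s.1 ++ [String.ofList (PySem.List.slice cs (some s.2) (some c))], c))
        (acc, (start : Int));
     if stB.2 < (cs.length : Int) then
       stB.1 ++ [String.ofList (PySem.List.slice cs (some stB.2) none)]
     else stB.1) := by
  induction rest generalizing k start acc with
  | nil =>
    have hkl : cs.length ≤ k := by
      have := List.drop_eq_nil_iff.mp hk
      omega
    simp only [PySem.List.enumerate_nil, List.foldl_nil, List.filterMap_nil,
      PySem.List.slice_from_natCast]
    have htake : (cs.drop start).take (k - start) = cs.drop start := by
      apply List.take_of_length_le; simp only [List.length_drop]; omega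
    rw [htake]
    by_cases h : start < cs.length
    · have h1 : cs.drop start ≠ [] := by
        simp only [ne_eq, List.drop_eq_nil_iff]; omega
      have h2 : (start : Int) < (cs.length : Int) := by exact_mod_cast h
      simp [h1, h2]
    · have h1 : cs.drop start = [] := by rw [List.drop_eq_nil_iff]; omega
      have h2 : ¬ ((start : Int) < (cs.length : Int)) := by exact_mod_cast h
      simp [h1, h2]
  | cons aa rest' ih =>
    have hklt : k < cs.length := by
      by_contra h
      rw [List.drop_eq_nil_iff.mpr (by omega)] at hk
      exact List.cons_ne_nil _ _ hk.symm
    have hget : cs[k]? = some aa := by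
      have h0 : (cs.drop k)[0]? = some aa := by rw [hk]; rfl
      rwa [List.getElem?_drop, Nat.add_zero] at h0
    have hdrop1 : cs.drop (k + 1) = rest' := by
      have h := congrArg (List.drop 1) hk
      rw [List.drop_drop] at h
      simpa [Nat.add_comm] using h
    have htake1 : (cs.drop start).take (k - start) ++ [aa]
        = (cs.drop start).take (k + 1 - start) := by
      have hlen : k - start < (cs.drop start).length := by simp; omega
      have hg : (cs.drop start)[k - start]? = some aa := by
        rw [List.getElem?_drop]
        rwa [Nat.add_sub_cancel' hs]
      have : k + 1 - start = (k - start) + 1 := by omega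
      rw [this, List.take_add_one, hg]
      rfl
    have hcast : ((k : Int) + 1) = ((k + 1 : Nat) : Int) := by push_cast; ring
    simp only [PySem.List.enumerate_cons, List.foldl_cons, List.filterMap_cons]
    by_cases hq : ((aa == 'K' || aa == 'R') && decide ((k : Int) + 1 < (cs.length : Int))
        && (PySem.List.pyGetD cs ((k : Int) + 1) ' ' != 'P')) = true
    · simp only [hq, if_true, List.foldl_cons]
      have hslice : PySem.List.slice cs (some (start : Int)) (some ((k + 1 : Nat) : Int))
          = (cs.drop start).take (k + 1 - start) := PySem.List.slice_natCast cs start (k + 1)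
      rw [hcast, htake1, hslice]
      have := ih (k + 1) (k + 1) (acc ++ [String.ofList ((cs.drop start).take (k + 1 - start))])
        hdrop1 (Nat.le_refl _) (by omega)
      simpa using this
    · simp only [hq]
      rw [hcast, htake1]
      have := ih (k + 1) start acc hdrop1 (by omega) (by omega)
      simpa using this

-- ===== VERDICT (by name: the statement is the Claim_ definition above) =====
theorem trypsin_digestion_spec : Claim_equal_trypsin_digestion := by
  intro s _
  unfold Spec_trypsin_digestion trypsin_digestion trypsin_digestion_alt
  have h := digestion_loop s.toList s.toList 0 0 [] (by simp) (Nat.le_refl 0) (Nat.zero_le _)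
  simpa using h
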